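-- pv_equiv track=rewrite | github.com/rodrigoazs/football-matches-prediction | src/dataset.py | _count_consecutive_strings_reverse
-- ===== SOURCE A (Python) =====
-- def _count_consecutive_strings_reverse(results: list[str], strings: list[str]) -> int:
--     count = 0
--     for el in results[::-1]:
--         if el in strings:
--             count += 1
--         else:
--             return count
--     return count
-- ===== SOURCE B (Python) =====
-- def _count_consecutive_strings_reverse(results: list[str], strings: list[str]) -> int:
--     count = 0
--     for el in results:
--         count = count + 1 if el in strings else 0
--     return count
-- ===== Notes on version B (the rewrite author's own statement) =====
-- stated objective: alternative
-- what changed: Replaced the reverse-slice scan with an early return by a single forward pass that resets a running counter on every non-member, so no reversed copy of the list is built and no early exit is needed.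
import Mathlib
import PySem

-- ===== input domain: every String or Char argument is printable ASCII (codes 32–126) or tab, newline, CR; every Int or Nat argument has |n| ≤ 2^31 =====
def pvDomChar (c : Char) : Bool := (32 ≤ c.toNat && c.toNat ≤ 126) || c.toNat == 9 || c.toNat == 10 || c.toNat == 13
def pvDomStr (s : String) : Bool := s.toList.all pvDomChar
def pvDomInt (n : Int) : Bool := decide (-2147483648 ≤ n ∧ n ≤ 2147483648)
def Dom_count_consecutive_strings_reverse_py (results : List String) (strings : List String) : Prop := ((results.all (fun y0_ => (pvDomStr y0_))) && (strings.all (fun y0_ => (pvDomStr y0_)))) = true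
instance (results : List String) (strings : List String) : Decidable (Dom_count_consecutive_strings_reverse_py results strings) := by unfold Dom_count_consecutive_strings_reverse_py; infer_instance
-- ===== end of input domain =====

-- B replaces A's reverse-slice scan with an early return by one forward pass with a resetting counter (alternative decomposition, same cost).
-- ===== PORT A =====
-- the `for el in …: if el in strings: count += 1 else: return count` loop of A
def pvALoop (strings : List String) (count : Int) : List String → Int
  | [] => count
  | el :: rest => if strings.contains el then pvALoop strings (count + 1) rest else count

def count_consecutive_strings_reverse_py (results : List String) (strings : List String) : Int :=
  -- results[::-1] is PySem.List.slice? results none none (-1), always `some`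
  pvALoop strings 0 ((PySem.List.slice? results none none (-1)).getD [])

-- ===== PORT B =====
def count_consecutive_strings_reverse_py_alt (results : List String) (strings : List String) : Int :=
  results.foldl (fun count el => if strings.contains el then count + 1 else 0) 0

-- ===== PRECONDITION & SPEC =====
def Spec_count_consecutive_strings_reverse_py (results : List String) (strings : List String) (out : Int) : Prop := out = count_consecutive_strings_reverse_py_alt results strings
instance (results : List String) (strings : List String) (out : Int) : Decidable (Spec_count_consecutive_strings_reverse_py results strings out) := by unfold Spec_count_consecutive_strings_reverse_py; infer_instance

-- ===== CLAIM (what is proved, stated in full; the proofs are below) =====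
def Claim_equal_count_consecutive_strings_reverse_py : Prop := ∀ (results : List String) (strings : List String), Dom_count_consecutive_strings_reverse_py results strings → Spec_count_consecutive_strings_reverse_py results strings (count_consecutive_strings_reverse_py results strings)

-- ===== LEMMAS AND PROOFS =====
theorem pv_tw_append_all {α : Type} (p : α → Bool) (xs ys : List α) (h : ∀ x ∈ xs, p x) :
    (xs ++ ys).takeWhile p = xs ++ ys.takeWhile p := by
  induction xs with
  | nil => simp
  | cons a t ih =>
    rw [List.cons_append, List.takeWhile_cons_of_pos (h a (List.mem_cons_self)),
      ih fun x hx => h x (List.mem_cons_of_mem a hx), List.cons_append]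

theorem pv_tw_append_stop {α : Type} (p : α → Bool) (xs ys : List α) (h : ¬ ∀ x ∈ xs, p x) :
    (xs ++ ys).takeWhile p = xs.takeWhile p := by
  induction xs with
  | nil => exact absurd (by simp) h
  | cons a t ih =>
    by_cases ha : p a
    · have h' : ¬ ∀ x ∈ t, p x := fun hall =>
        h fun x hx => (List.mem_cons.mp hx).elim (fun e => e ▸ ha) (hall x)
      rw [List.cons_append, List.takeWhile_cons_of_pos ha, List.takeWhile_cons_of_pos ha, ih h']
    · rw [List.cons_append, List.takeWhile_cons_of_neg ha, List.takeWhile_cons_of_neg ha]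

theorem pvALoop_eq (strings : List String) (l : List String) (c : Int) :
    pvALoop strings c l = c + ((l.takeWhile (fun el => strings.contains el)).length : Int) := by
  induction l generalizing c with
  | nil => simp [pvALoop]
  | cons el rest ih =>
    by_cases h : strings.contains el
    · rw [pvALoop, if_pos h, ih, List.takeWhile_cons_of_pos h, List.length_cons]
      push_cast; ring
    · rw [pvALoop, if_neg h, List.takeWhile_cons_of_neg h]
      simp

theorem pvFold_eq (strings : List String) (l : List String) (c : Int) :
    l.foldl (fun count el => if strings.contains el then count + 1 else 0) c =
      if ∀ x ∈ l, strings.contains x then c + (l.length : Int)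
      else ((l.reverse.takeWhile (fun el => strings.contains el)).length : Int) := by
  induction l generalizing c with
  | nil => simp
  | cons el rest ih =>
    rw [List.foldl_cons, List.reverse_cons]
    by_cases hall : ∀ x ∈ rest, strings.contains x
    · by_cases hel : strings.contains el
      · have h' : ∀ x ∈ el :: rest, strings.contains x := fun x hx =>
          (List.mem_cons.mp hx).elim (fun e => e ▸ hel) (hall x)
        rw [if_pos hel, ih, if_pos hall, if_pos h', List.length_cons]
        push_cast; ring
      · have hnall : ¬ ∀ x ∈ el :: rest, strings.contains x := fun h =>
          hel (h el List.mem_cons_self)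
        have hrev : ∀ x ∈ rest.reverse, (fun el => strings.contains el) x = true := fun x hx =>
          hall x (List.mem_reverse.mp hx)
        rw [if_neg hel, ih, if_pos hall, if_neg hnall, pv_tw_append_all _ _ _ hrev,
          List.takeWhile_cons_of_neg hel]
        simp
    · have hnall : ¬ ∀ x ∈ el :: rest, strings.contains x := fun h =>
        hall fun x hx => h x (List.mem_cons_of_mem el hx)
      have hnrev : ¬ ∀ x ∈ rest.reverse, (fun el => strings.contains el) x = true := fun h =>
        hall fun x hx => h x (List.mem_reverse.mpr hx)
      rw [if_neg hnall, pv_tw_append_stop _ _ _ hnrev]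
      by_cases hel : strings.contains el
      · rw [if_pos hel, ih, if_neg hall]
      · rw [if_neg hel, ih, if_neg hall]

-- ===== VERDICT (by name: the statement is the Claim_ definition above) =====
theorem count_consecutive_strings_reverse_py_spec : Claim_equal_count_consecutive_strings_reverse_py := by
  intro results strings _
  unfold Spec_count_consecutive_strings_reverse_py
  unfold count_consecutive_strings_reverse_py count_consecutive_strings_reverse_py_alt
  rw [PySem.List.slice?_none_none_neg_one, Option.getD_some, pvALoop_eq, pvFold_eq]
  by_cases hall : ∀ x ∈ results, strings.contains x
  · have hrev : ∀ x ∈ results.reverse, (fun el => strings.contains el) x = true := fun x hx =>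
      hall x (List.mem_reverse.mp hx)
    rw [if_pos hall, List.takeWhile_eq_self_iff.mpr hrev]
    simp
  · rw [if_neg hall]; omega
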